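-- pv_equiv track=rewrite | github.com/Nafaryus27/pySIMS | pySIMS.py | get_ms_datafile_index
-- ===== SOURCE A (Python) =====
-- def get_ms_datafile_index (lignes, sample)     :
--
--     titres = ["*** DATA FILES ***",
--               "*** DATA START ***",
--               "*** DATA END ***",
--               "*** ANALYSIS POSITION ***",
--               "*** ANALYSIS RECIPE ***",
--               "*** ACQUISITION PARAMETERS ***",
--               "*** MEASUREMENT CONDITIONS, "+sample+".ms ***",
--               "*** MAIN ANALYTICAL PARAMETERS (MAP) ***",
--               "*** OPTIONAL INSTRUMENTAL PARAMETERS (OIP) ***",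
--               "*** ION DETECTOR PARAMETERS ***",
--               "*** OTHERS ***"]
--     index = []
--     compteur = -1
--
--     for titre in titres:
--         for ligne in lignes:
--             compteur += 1
--             if titre in ligne:
--                 index.append(compteur)
--                 compteur = 0
--                 break
--     return index
-- ===== SOURCE B (Python) =====
-- def _scan(lignes, t):
--     """Linear search for t: number of lines read (the match line included) and whether it was found."""
--     c = 0
--     for l in lignes:
--         c += 1
--         if t in l:
--             return (c, True)
--     return (c, False)
--
--
-- def get_ms_datafile_index(lignes, sample):
--     titres = ["*** DATA FILES ***",
--               "*** DATA START ***",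
--               "*** DATA END ***",
--               "*** ANALYSIS POSITION ***",
--               "*** ANALYSIS RECIPE ***",
--               "*** ACQUISITION PARAMETERS ***",
--               "*** MEASUREMENT CONDITIONS, "+sample+".ms ***",
--               "*** MAIN ANALYTICAL PARAMETERS (MAP) ***",
--               "*** OPTIONAL INSTRUMENTAL PARAMETERS (OIP) ***",
--               "*** ION DETECTOR PARAMETERS ***",
--               "*** OTHERS ***"]
--     # One linear scan per title; marks = 0-based positions of the matched lines
--     # on the concatenation of the successive scans.
--     scans = [_scan(lignes, t) for t in titres]
--     marks = []
--     total = 0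
--     for c, found in scans:
--         total += c
--         if found:
--             marks.append(total - 1)
--     if not marks:
--         return []
--     # first mark's position, then the gaps between consecutive marks
--     return [marks[0]] + [b - a for a, b in zip(marks, marks[1:])]
-- ===== Notes on version B (the rewrite author's own statement) =====
-- stated objective: alternative
-- what changed: B replaces A's interleaved nested loop with a shared running counter by three phases: a table of per-title linear-scan lengths, a prefix-sum pass collecting each match's absolute position on the concatenated scans, and a first-position-plus-gaps construction.
import Mathlib
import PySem

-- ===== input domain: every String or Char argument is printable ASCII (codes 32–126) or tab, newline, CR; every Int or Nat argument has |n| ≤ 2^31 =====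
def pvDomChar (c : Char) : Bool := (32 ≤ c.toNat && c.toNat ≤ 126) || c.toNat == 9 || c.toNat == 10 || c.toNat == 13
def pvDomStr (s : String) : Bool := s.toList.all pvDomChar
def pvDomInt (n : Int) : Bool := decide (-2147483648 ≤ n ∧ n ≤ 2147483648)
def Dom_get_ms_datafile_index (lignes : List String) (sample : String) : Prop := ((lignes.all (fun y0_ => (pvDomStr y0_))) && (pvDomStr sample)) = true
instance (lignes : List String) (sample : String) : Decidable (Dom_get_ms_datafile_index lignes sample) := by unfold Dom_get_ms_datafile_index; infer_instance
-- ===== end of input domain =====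

-- B re-derives the indices from per-title linear-scan lengths: match positions on the concatenated scans, then first position + gaps; alternative decomposition, same cost.


def pvTitres (sample : String) : List String :=
  ["*** DATA FILES ***",
   "*** DATA START ***",
   "*** DATA END ***",
   "*** ANALYSIS POSITION ***",
   "*** ANALYSIS RECIPE ***",
   "*** ACQUISITION PARAMETERS ***",
   "*** MEASUREMENT CONDITIONS, " ++ sample ++ ".ms ***",
   "*** MAIN ANALYTICAL PARAMETERS (MAP) ***",
   "*** OPTIONAL INSTRUMENTAL PARAMETERS (OIP) ***",
   "*** ION DETECTOR PARAMETERS ***",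
   "*** OTHERS ***"]

-- ===== PORT A =====
-- A's inner loop over `lignes`: increment compteur per line; on a match append compteur, reset to 0 and break.
def pvInnerA (titre : String) (lignes : List String) (c : Int) : Int × Option Int :=
  match lignes with
  | [] => (c, none)
  | l :: rest =>
    let c := c + 1
    if PySem.Str.isIn titre l then (0, some c) else pvInnerA titre rest c

-- A's outer loop over the titles, threading (index, compteur).
def pvOuterA (titres lignes : List String) (index : List Int) (c : Int) : List Int :=
  match titres with
  | [] => index
  | t :: rest =>
    match pvInnerA t lignes c with
    | (c', some v) => pvOuterA rest lignes (index ++ [v]) c'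
    | (c', none)   => pvOuterA rest lignes index c'

def get_ms_datafile_index (lignes : List String) (sample : String) : List Int :=
  pvOuterA (pvTitres sample) lignes [] (-1)

-- ===== PORT B =====
-- Source B's _scan: lines read by a linear search for t (match line included), and whether t was found.
def pvScanGo (t : String) (lignes : List String) (c : Nat) : Nat × Bool :=
  match lignes with
  | [] => (c, false)
  | l :: rest =>
    let c := c + 1
    if PySem.Str.isIn t l then (c, true) else pvScanGo t rest c

-- Source B's marks loop: 0-based positions of the matched lines on the concatenated scans.
def pvMarksGo (scans : List (Nat × Bool)) (total : Nat) : List Nat :=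
  match scans with
  | [] => []
  | (c, found) :: r =>
    let total := total + c
    if found then (total - 1) :: pvMarksGo r total else pvMarksGo r total

def get_ms_datafile_index_alt (lignes : List String) (sample : String) : List Int :=
  let scans := (pvTitres sample).map (fun t => pvScanGo t lignes 0)
  let marks := pvMarksGo scans 0
  match marks with
  | [] => []
  | m :: rest => (m : Int) :: (marks.zip rest).map (fun ab => (ab.2 : Int) - (ab.1 : Int))

-- ===== PRECONDITION & SPEC =====
def Spec_get_ms_datafile_index (lignes : List String) (sample : String) (out : List Int) : Prop := out = get_ms_datafile_index_alt lignes sample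
instance (lignes : List String) (sample : String) (out : List Int) : Decidable (Spec_get_ms_datafile_index lignes sample out) := by unfold Spec_get_ms_datafile_index; infer_instance

-- ===== CLAIM =====
def Claim_equal_get_ms_datafile_index : Prop := ∀ (lignes : List String) (sample : String), Dom_get_ms_datafile_index lignes sample → Spec_get_ms_datafile_index lignes sample (get_ms_datafile_index lignes sample)

-- ===== LEMMAS AND PROOFS =====

-- A's fold step over the per-title first positions.
def pvStepA (L : Int) (s : List Int × Int) (p : Option Nat) : List Int × Int :=
  match p with
  | none => (s.1, s.2 + L)
  | some q => (s.1 ++ [s.2 + (q : Int) + 1], 0)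

-- First index of a line containing t (abstract description shared by both characterisations).
def pvFirstPos (lignes : List String) (t : String) : Option Nat :=
  match lignes with
  | [] => none
  | l :: rest => if PySem.Str.isIn t l then some 0 else (pvFirstPos rest t).map (· + 1)

-- What a scan returns, as a function of the first position.
def pvScanOf (n : Nat) (o : Option Nat) : Nat × Bool :=
  match o with
  | some q => (q + 1, true)
  | none => (n, false)

-- The common normal form: entries relative to the last match position.
def pvRel (n : Nat) : List (Option Nat) → Nat → Nat → List Int
  | [], _, _ => []
  | none :: r, total, lastm => pvRel n r (total + n) lastm
  | some q :: r, total, lastm =>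
      (((total + q : Nat) : Int) - (lastm : Int)) :: pvRel n r (total + q + 1) (total + q)

def pvHeadDiffs : List Nat → Nat → List Int
  | [], _ => []
  | m :: r, lastm => ((m : Int) - (lastm : Int)) :: pvHeadDiffs r m

lemma pvInnerA_eq (t : String) : ∀ (lignes : List String) (c : Int),
    pvInnerA t lignes c =
      match pvFirstPos lignes t with
      | some p => (0, some (c + (p : Int) + 1))
      | none   => (c + (lignes.length : Int), none) := by
  intro lignes
  induction lignes with
  | nil => intro c; simp [pvInnerA, pvFirstPos]
  | cons l rest ih =>
    intro c
    by_cases h : PySem.Chars.isIn t.toList l.toList = true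
    · simp [pvInnerA, pvFirstPos, h]
    · simp only [pvInnerA, pvFirstPos, PySem.Str.isIn_eq, h, ih (c + 1)]
      cases hp : pvFirstPos rest t with
      | none => simp; ring
      | some p => simp; ring

lemma pvOuterA_eq (lignes : List String) : ∀ (ts : List String) (idx : List Int) (c : Int),
    pvOuterA ts lignes idx c =
      ((ts.map (fun t => pvFirstPos lignes t)).foldl
        (pvStepA (lignes.length : Int)) (idx, c)).1 := by
  intro ts
  induction ts with
  | nil => intro idx c; simp [pvOuterA]
  | cons t rest ih =>
    intro idx c
    rw [pvOuterA, pvInnerA_eq]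
    cases hp : pvFirstPos lignes t with
    | none => simp [hp, ih, pvStepA]
    | some p => simp [hp, ih, pvStepA]

lemma pvScanGo_eq (t : String) : ∀ (lignes : List String) (c : Nat),
    pvScanGo t lignes c =
      match pvFirstPos lignes t with
      | some p => (c + p + 1, true)
      | none   => (c + lignes.length, false) := by
  intro lignes
  induction lignes with
  | nil => intro c; simp [pvScanGo, pvFirstPos]
  | cons l rest ih =>
    intro c
    by_cases h : PySem.Chars.isIn t.toList l.toList = true
    · simp [pvScanGo, pvFirstPos, PySem.Str.isIn_eq, h]
    · simp only [pvScanGo, pvFirstPos, PySem.Str.isIn_eq, h, ih (c + 1)]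
      cases hp : pvFirstPos rest t with
      | none => simp; ring
      | some p => simp; ring

-- A's fold, started at carry = total - 1 - lastm, produces the relative entries.
lemma fold_rel (n : Nat) : ∀ (opts : List (Option Nat)) (acc : List Int) (total lastm : Nat),
    ((opts.foldl (pvStepA (n : Int)) (acc, (total : Int) - 1 - (lastm : Int))).1
      = acc ++ pvRel n opts total lastm) := by
  intro opts
  induction opts with
  | nil => intro acc total lastm; simp [pvRel]
  | cons o r ih =>
    intro acc total lastm
    cases o with
    | none =>
      rw [List.foldl_cons]
      have hst : pvStepA (n : Int) (acc, (total : Int) - 1 - (lastm : Int)) none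
          = (acc, ((total + n : Nat) : Int) - 1 - (lastm : Int)) := by
        simp [pvStepA]; ring
      rw [hst, ih acc (total + n) lastm]
      simp [pvRel]
    | some q =>
      rw [List.foldl_cons]
      have hst : pvStepA (n : Int) (acc, (total : Int) - 1 - (lastm : Int)) (some q)
          = (acc ++ [((total + q : Nat) : Int) - (lastm : Int)],
             ((total + q + 1 : Nat) : Int) - 1 - ((total + q : Nat) : Int)) := by
        simp only [pvStepA, Prod.mk.injEq]
        constructor
        · have : ((total + q : Nat) : Int) - (lastm : Int)
              = (total : Int) - 1 - (lastm : Int) + (q : Int) + 1 := by push_cast; ring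
          rw [this]
        · push_cast; ring
      rw [hst, ih _ (total + q + 1) (total + q)]
      simp [pvRel, List.append_assoc]

-- B's marks loop, read through pvHeadDiffs, produces the same relative entries.
lemma marks_rel (n : Nat) : ∀ (opts : List (Option Nat)) (total lastm : Nat),
    pvHeadDiffs (pvMarksGo (opts.map (pvScanOf n)) total) lastm = pvRel n opts total lastm := by
  intro opts
  induction opts with
  | nil => intro total lastm; simp [pvMarksGo, pvHeadDiffs, pvRel]
  | cons o r ih =>
    intro total lastm
    cases o with
    | none => simpa [pvScanOf, pvMarksGo, pvRel] using ih (total + n) lastm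
    | some q =>
      have h2 : total + (q + 1) = total + q + 1 := by omega
      have h3 : total + q + 1 - 1 = total + q := by omega
      simp only [List.map_cons, pvScanOf, pvMarksGo, if_true, h2, h3, pvHeadDiffs, pvRel]
      rw [ih (total + q + 1) (total + q)]

-- B's first-plus-gaps construction is pvHeadDiffs.
lemma headdiffs_eq : ∀ (marks : List Nat) (lastm : Nat),
    pvHeadDiffs marks lastm =
      (match marks with
       | [] => []
       | m :: rest => ((m : Int) - (lastm : Int)) ::
           (marks.zip rest).map (fun ab => (ab.2 : Int) - (ab.1 : Int))) := by
  intro marks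
  induction marks with
  | nil => intro lastm; simp [pvHeadDiffs]
  | cons m rest ih =>
    intro lastm
    rw [pvHeadDiffs, ih m]
    cases rest with
    | nil => simp
    | cons m2 r2 => simp

lemma headdiffs_zero (marks : List Nat) :
    (match marks with
     | [] => ([] : List Int)
     | m :: rest => (m : Int) :: (marks.zip rest).map (fun ab => (ab.2 : Int) - (ab.1 : Int)))
    = pvHeadDiffs marks 0 := by
  rw [headdiffs_eq]
  cases marks <;> simp

lemma alt_eq_rel (lignes : List String) (sample : String) :
    get_ms_datafile_index_alt lignes sample =
      pvRel lignes.length ((pvTitres sample).map (fun t => pvFirstPos lignes t)) 0 0 := by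
  have hmap : (pvTitres sample).map (fun t => pvScanGo t lignes 0)
      = ((pvTitres sample).map (fun t => pvFirstPos lignes t)).map (pvScanOf lignes.length) := by
    rw [List.map_map]
    apply List.map_congr_left
    intro t _
    rw [Function.comp_apply, pvScanGo_eq]
    cases pvFirstPos lignes t <;> simp [pvScanOf]
  have step1 : get_ms_datafile_index_alt lignes sample
      = pvHeadDiffs (pvMarksGo ((pvTitres sample).map (fun t => pvScanGo t lignes 0)) 0) 0 :=
    headdiffs_zero _
  rw [step1, hmap]
  exact marks_rel _ _ 0 0

-- ===== VERDICT =====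
theorem get_ms_datafile_index_spec : Claim_equal_get_ms_datafile_index := by
  intro lignes sample _
  unfold Spec_get_ms_datafile_index get_ms_datafile_index
  rw [pvOuterA_eq, alt_eq_rel]
  have h0 : (-1 : Int) = ((0 : Nat) : Int) - 1 - ((0 : Nat) : Int) := by norm_num
  rw [h0, fold_rel lignes.length _ [] 0 0]
  simp
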